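-- pv_equiv track=rewrite | github.com/ML-TANGO/TANGO2 | GenAI_Platform/apps/fb_utils/common.py | get_optimal_gpus
-- ===== SOURCE A (Python) =====
-- from collections import defaultdict
--
-- def get_optimal_gpus(data, num_gpus):
--     nodes = defaultdict(list)
--     for item in data:
--         nodes[item["node_name"]].append(item["gpu_uuid"])
--
--     # 노드를 내림차순으로 정렬하는 GPU 수를 기준으로 노드 정렬
--     sorted_nodes = sorted(nodes.items(), key=lambda x: len(x[1]), reverse=True)
--
--     result = []
--     remaining_gpus = num_gpus
--
--     for node, gpus in sorted_nodes:
--         if remaining_gpus <= 0: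
--             break
--
--         # 노드에 요청을 수행할 수 있는 충분한 GPU가 있으면 필요한 것만 가져갑니다
--         if len(gpus) >= remaining_gpus:
--             result.extend([{"node_name": node, "gpu_uuid": gpu} for gpu in gpus[:remaining_gpus]])
--             remaining_gpus = 0
--         else:
--             # 그렇지 않으면 이 노드에서 모든 GPU를 가져가고 다음 노드로 계속 이동합니다
--             result.extend([{"node_name": node, "gpu_uuid": gpu} for gpu in gpus])
--             remaining_gpus -= len(gpus)
--
--     return result
-- ===== SOURCE B (Python) =====
-- def get_optimal_gpus(data, num_gpus):
--     nodes = {}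
--     for item in data:
--         nodes.setdefault(item["node_name"], []).append(item["gpu_uuid"])
--     result = []
--     remaining = num_gpus
--     while remaining > 0 and nodes:
--         best = max(nodes, key=lambda n: len(nodes[n]))
--         take = nodes.pop(best)[:remaining]
--         result.extend({"node_name": best, "gpu_uuid": g} for g in take)
--         remaining -= len(take)
--     return result
-- ===== Notes on version B (the rewrite author's own statement) =====
-- stated objective: alternative
-- what changed: Replaces A's stable sort of all groups plus a budgeted scan with a break by sortless repeated selection: while budget remains, find the group with most GPUs via max(), pop it from the dict and emit a slice of it.
import Mathlib
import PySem

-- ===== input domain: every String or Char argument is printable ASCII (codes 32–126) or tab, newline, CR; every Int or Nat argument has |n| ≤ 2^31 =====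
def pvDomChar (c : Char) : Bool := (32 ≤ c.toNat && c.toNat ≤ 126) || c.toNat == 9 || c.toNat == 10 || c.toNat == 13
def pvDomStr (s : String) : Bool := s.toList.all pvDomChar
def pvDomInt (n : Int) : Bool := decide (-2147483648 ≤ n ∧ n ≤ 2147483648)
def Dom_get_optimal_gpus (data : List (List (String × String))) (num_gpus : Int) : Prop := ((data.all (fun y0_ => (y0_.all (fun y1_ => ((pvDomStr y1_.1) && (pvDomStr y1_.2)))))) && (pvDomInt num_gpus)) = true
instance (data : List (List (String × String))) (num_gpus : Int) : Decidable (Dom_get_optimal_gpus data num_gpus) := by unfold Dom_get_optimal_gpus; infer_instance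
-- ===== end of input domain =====

-- B replaces A's sort-then-scan (stable sort of all groups by size descending, then a
-- budgeted walk) by sortless repeated selection: while budget remains, pick the group
-- with most GPUs (first on ties, as Python's max), pop it, emit a slice; objective: alternative.

-- ===== PORT A =====
-- the grouping loop, shared verbatim by both ports: A's 'nodes = defaultdict(list);
-- nodes[k].append(v)' and B's 'nodes = {}; nodes.setdefault(k, []).append(v)' are the
-- same fold (append v to the list at k, inserting [] for a new key)
def pvGroupNodes (data : List (List (String × String))) : PySem.Dict String (List String) :=
  data.foldl
    (fun d item =>
      d.modify ((item.lookup "node_name").getD "") [] (· ++ [(item.lookup "gpu_uuid").getD ""]))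
    PySem.Dict.empty

-- the for-loop over sorted_nodes with the break and the if/else on remaining_gpus
def pvLoopA : List (String × List String) → List (List (String × String)) → Int → List (List (String × String))
  | [], result, _ => result
  | (node, gpus) :: rest, result, remaining =>
    if remaining ≤ 0 then result
    else if remaining ≤ (gpus.length : Int) then
      pvLoopA rest
        (result ++ (PySem.List.slice gpus none (some remaining)).map
          (fun gpu => [("node_name", node), ("gpu_uuid", gpu)])) 0
    else
      pvLoopA rest
        (result ++ gpus.map (fun gpu => [("node_name", node), ("gpu_uuid", gpu)]))
        (remaining - gpus.length)

def get_optimal_gpus (data : List (List (String × String))) (num_gpus : Int) : List (List (String × String)) :=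
  pvLoopA (PySem.List.sorted (pvGroupNodes data).items (fun x => (x.2.length : Int)) true) [] num_gpus

-- ===== PORT B =====
-- 'while remaining > 0 and nodes:' over the dict's entries; 'max(nodes, key=lambda n:
-- len(nodes[n]))' is the FIRST entry of maximal group size (dict keys are unique, so
-- max? over the items with key = length of the value is exactly Python's max over the
-- keys), and 'nodes.pop(best)' removes that entry
def pvLoopB (items : List (String × List String)) (result : List (List (String × String))) (remaining : Int) : List (List (String × String)) :=
  if remaining ≤ 0 then result
  else
    match hm : PySem.List.max? items (fun p => (p.2.length : Int)) with
    | none => result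
    | some best =>
      let take := PySem.List.slice best.2 none (some remaining)
      pvLoopB (items.erase best)
        (result ++ take.map (fun gpu => [("node_name", best.1), ("gpu_uuid", gpu)]))
        (remaining - take.length)
termination_by items.length
decreasing_by
  have hmem := PySem.List.max?_mem hm
  rw [List.length_erase_of_mem hmem]
  have : items.length ≠ 0 := by rintro h; rw [List.length_eq_zero_iff] at h; subst h; simp at hmem
  omega

def get_optimal_gpus_alt (data : List (List (String × String))) (num_gpus : Int) : List (List (String × String)) :=
  pvLoopB (pvGroupNodes data).items [] num_gpus

-- ===== PRECONDITION & SPEC =====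
-- Pre_ excludes exactly the inputs on which A raises KeyError: an item missing the
-- "node_name" or "gpu_uuid" key.
def Pre_get_optimal_gpus (data : List (List (String × String))) (num_gpus : Int) : Prop :=
  ∀ item ∈ data, (item.lookup "node_name").isSome ∧ (item.lookup "gpu_uuid").isSome

instance (data : List (List (String × String))) (num_gpus : Int) : Decidable (Pre_get_optimal_gpus data num_gpus) := by unfold Pre_get_optimal_gpus; infer_instance

def pvWitness_get_optimal_gpus : (List (List (String × String))) × Int :=
  ([[("node_name", "a"), ("gpu_uuid", "x")], [("node_name", "b"), ("gpu_uuid", "y")]], 1)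

def Spec_get_optimal_gpus (data : List (List (String × String))) (num_gpus : Int) (out : List (List (String × String))) : Prop := out = get_optimal_gpus_alt data num_gpus
instance (data : List (List (String × String))) (num_gpus : Int) (out : List (List (String × String))) : Decidable (Spec_get_optimal_gpus data num_gpus out) := by unfold Spec_get_optimal_gpus; infer_instance

-- ===== CLAIM (what is proved, stated in full; the proofs are below) =====
def Claim_equal_get_optimal_gpus : Prop := ∀ (data : List (List (String × String))) (num_gpus : Int), Dom_get_optimal_gpus data num_gpus → Pre_get_optimal_gpus data num_gpus → Spec_get_optimal_gpus data num_gpus (get_optimal_gpus data num_gpus)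

-- ===== LEMMAS AND PROOFS =====

-- A's accumulator loop is 'flatten-then-take': starting from `res` with budget `rem`,
-- it appends exactly the first rem.toNat elements of the flattened groups.
theorem pvLoopA_eq_take (l : List (String × List String))
    (res : List (List (String × String))) (rem : Int) :
    pvLoopA l res rem =
      res ++ ((l.flatMap (fun p => p.2.map (fun gpu => [("node_name", p.1), ("gpu_uuid", gpu)]))).take rem.toNat) := by
  induction l generalizing res rem with
  | nil => simp [pvLoopA]
  | cons hd rest ih =>
    obtain ⟨node, gpus⟩ := hd
    by_cases h0 : rem ≤ 0
    · have : rem.toNat = 0 := by omega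
      simp [pvLoopA, h0, this]
    · by_cases h1 : rem ≤ (gpus.length : Int)
      · have hto : rem.toNat ≤ gpus.length := by omega
        rw [pvLoopA, if_neg h0, if_pos h1, ih,
          PySem.List.slice_to gpus (by omega)]
        simp only [List.flatMap_cons, Int.toNat_zero, List.take_zero, List.append_nil]
        rw [List.take_append_of_le_length (by simpa using hto), List.map_take]
      · have hlen : gpus.length ≤ rem.toNat := by omega
        have hto : (rem - gpus.length).toNat = rem.toNat - gpus.length := by omega
        have hmap : (gpus.map (fun gpu => [("node_name", node), ("gpu_uuid", gpu)])).take rem.toNat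
            = gpus.map (fun gpu => [("node_name", node), ("gpu_uuid", gpu)]) :=
          List.take_of_length_le (by simpa using hlen)
        rw [pvLoopA, if_neg h0, if_neg h1, ih, List.flatMap_cons, List.take_append, hmap,
          List.length_map, hto, List.append_assoc]

-- Python's max returns the FIRST extremal element: max? l key = some m splits l into a
-- strictly smaller prefix, m, and a ≤ suffix.
theorem pvMaxGo {α : Type} (key : α → Int) (t : List α) : ∀ (m : α),
    ∃ m', t.foldl (fun acc x => match acc with
        | none => some x
        | some a => if key a < key x then some x else some a) (some m) = some m' ∧
      ((m' = m ∧ ∀ y ∈ t, key y ≤ key m) ∨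
       ∃ t₁ t₂, t = t₁ ++ m' :: t₂ ∧ key m < key m' ∧ (∀ y ∈ t₁, key y < key m') ∧ (∀ y ∈ t₂, key y ≤ key m')) := by
  induction t with
  | nil => intro m; exact ⟨m, rfl, Or.inl ⟨rfl, by simp⟩⟩
  | cons y t ih =>
    intro m
    rw [List.foldl_cons]
    by_cases hy : key m < key y
    · obtain ⟨m', hfold, hcase⟩ := ih y
      refine ⟨m', by simpa [hy] using hfold, Or.inr ?_⟩
      rcases hcase with ⟨rfl, hle⟩ | ⟨t₁, t₂, rfl, hlt, hpre, hsuf⟩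
      · exact ⟨[], t, rfl, hy, by simp, hle⟩
      · refine ⟨y :: t₁, t₂, rfl, lt_trans hy hlt, ?_, hsuf⟩
        intro z hz
        rcases List.mem_cons.mp hz with rfl | hz
        · exact hlt
        · exact hpre z hz
    · obtain ⟨m', hfold, hcase⟩ := ih m
      refine ⟨m', by simpa [hy] using hfold, ?_⟩
      rcases hcase with ⟨rfl, hle⟩ | ⟨t₁, t₂, rfl, hlt, hpre, hsuf⟩
      · exact Or.inl ⟨rfl, by intro z hz; rcases List.mem_cons.mp hz with rfl | hz; omega; exact hle z hz⟩
      · refine Or.inr ⟨y :: t₁, t₂, rfl, hlt, ?_, hsuf⟩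
        intro z hz
        rcases List.mem_cons.mp hz with rfl | hz
        · omega
        · exact hpre z hz

theorem pvMax?_spec {α : Type} (key : α → Int) (l : List α) (m : α)
    (h : PySem.List.max? l key = some m) :
    ∃ l₁ l₂, l = l₁ ++ m :: l₂ ∧ (∀ y ∈ l₁, key y < key m) ∧ (∀ y ∈ l₂, key y ≤ key m) := by
  cases l with
  | nil => simp [PySem.List.max?] at h
  | cons x t =>
    obtain ⟨m', hfold, hcase⟩ := pvMaxGo key t x
    rw [PySem.List.max?, List.foldl_cons] at h
    have h2 : t.foldl (fun acc y => match acc with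
        | none => some y
        | some a => if key a < key y then some y else some a) (some x) = some m := h
    have hm : m' = m := Option.some.inj (hfold.symm.trans h2)
    subst hm
    rcases hcase with ⟨rfl, hle⟩ | ⟨t₁, t₂, rfl, hlt, hpre, hsuf⟩
    · exact ⟨[], t, rfl, by simp, hle⟩
    · refine ⟨x :: t₁, t₂, rfl, ?_, hsuf⟩
      intro z hz
      rcases List.mem_cons.mp hz with rfl | hz
      · exact hlt
      · exact hpre z hz

-- insertBy puts x at the head when x sorts before every element of acc
theorem pvInsertHead {α : Type} (bef : α → α → Bool) (x : α) (acc : List α)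
    (h : ∀ y ∈ acc, bef x y = true) : PySem.List.insertBy bef x acc = x :: acc := by
  cases acc with
  | nil => rfl
  | cons y ys => rw [PySem.List.insertBy, if_pos (h y (by simp))]

-- folding insertions of only-≤ elements leaves a maximal head in place
theorem pvFoldlInsCons (key : (String × List String) → Int) (m : String × List String)
    (l : List (String × List String)) (hle : ∀ y ∈ l, key y ≤ key m) :
    ∀ acc, l.foldl (fun acc x => PySem.List.insertBy (fun a b => decide (key b < key a)) x acc) (m :: acc)
      = m :: l.foldl (fun acc x => PySem.List.insertBy (fun a b => decide (key b < key a)) x acc) acc := by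
  induction l with
  | nil => intro acc; rfl
  | cons y t ih =>
    intro acc
    have hy : key y ≤ key m := hle y (by simp)
    have hstep : PySem.List.insertBy (fun a b => decide (key b < key a)) y (m :: acc)
        = m :: PySem.List.insertBy (fun a b => decide (key b < key a)) y acc := by
      rw [PySem.List.insertBy]
      have : decide (key m < key y) = false := by simp; omega
      cases acc with
      | nil => rw [if_neg (by simp [this])]
      | cons z zs => rw [if_neg (by simp [this])]
    rw [List.foldl_cons, hstep, ih (fun z hz => hle z (by simp [hz])), List.foldl_cons]

-- stable descending sort = first-maximal element, then the sort of the rest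
theorem pvSortedRevCons (key : (String × List String) → Int)
    (l : List (String × List String)) (m : String × List String)
    (h : PySem.List.max? l key = some m) :
    PySem.List.sorted l key true = m :: PySem.List.sorted (l.erase m) key true := by
  obtain ⟨l₁, l₂, rfl, hpre, hsuf⟩ := pvMax?_spec key l m h
  have hnotmem : m ∉ l₁ := fun hm => absurd (hpre m hm) (lt_irrefl _)
  have herase : (l₁ ++ m :: l₂).erase m = l₁ ++ l₂ := by
    rw [List.erase_append_right _ hnotmem, List.erase_cons_head]
  rw [herase, PySem.List.sorted_rev_eq_foldl_insertBy, PySem.List.sorted_rev_eq_foldl_insertBy,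
    List.foldl_append, List.foldl_append, List.foldl_cons]
  have hacc : ∀ y ∈ l₁.foldl (fun acc x => PySem.List.insertBy (fun a b => decide (key b < key a)) x acc) [], key y < key m := by
    intro y hy
    have : y ∈ PySem.List.sorted l₁ key true := by
      rw [PySem.List.sorted_rev_eq_foldl_insertBy]; exact hy
    exact hpre y ((PySem.List.mem_sorted _ _ _ _).mp this)
  rw [pvInsertHead _ _ _ (fun y hy => by simpa using hacc y hy)]
  exact pvFoldlInsCons key m l₂ hsuf _

-- B's selection loop also computes 'flatten the sorted groups, take the budget'.
theorem pvLoopB_eq_take : ∀ (n : Nat) (l : List (String × List String))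
    (res : List (List (String × String))) (rem : Int), l.length ≤ n →
    pvLoopB l res rem =
      res ++ (((PySem.List.sorted l (fun p => (p.2.length : Int)) true).flatMap
        (fun p => p.2.map (fun gpu => [("node_name", p.1), ("gpu_uuid", gpu)]))).take rem.toNat) := by
  intro n
  induction n with
  | zero =>
    intro l res rem hl
    obtain rfl : l = [] := List.length_eq_zero_iff.mp (Nat.le_zero.mp hl)
    rw [pvLoopB]
    by_cases h0 : rem ≤ 0
    · simp [h0, PySem.List.sorted]
    · simp [h0, PySem.List.sorted, PySem.List.max?]
  | succ n ih =>
    intro l res rem hl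
    rw [pvLoopB]
    by_cases h0 : rem ≤ 0
    · have : rem.toNat = 0 := by omega
      simp [h0, this]
    · rw [if_neg h0]
      split
      · next heq =>
        obtain rfl : l = [] := (PySem.List.max?_eq_none_iff _ _).mp heq
        simp [PySem.List.sorted]
      · next best heq =>
        have hmem := PySem.List.max?_mem heq
        have hlen : (l.erase best).length ≤ n := by
          rw [List.length_erase_of_mem hmem]
          have : l.length ≠ 0 := by
            rintro hz; rw [List.length_eq_zero_iff] at hz; subst hz; simp at hmem
          omega
        rw [PySem.List.slice_to _ (by omega), ih (l.erase best) _ _ hlen,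
          pvSortedRevCons _ l best heq, List.flatMap_cons, List.take_append]
        have hmin : (best.2.take rem.toNat).length = min rem.toNat best.2.length := by
          simp [List.length_take]
        have hto : (rem - ((best.2.take rem.toNat).length : Int)).toNat
            = rem.toNat - (best.2.map (fun gpu => [("node_name", best.1), ("gpu_uuid", gpu)])).length := by
          rw [List.length_map]; omega
        rw [hto, List.map_take, List.append_assoc]

-- ===== VERDICT (by name: the statement is the Claim_ definition above) =====
theorem get_optimal_gpus_spec : Claim_equal_get_optimal_gpus := by
  intro data num_gpus _ _
  unfold Spec_get_optimal_gpus get_optimal_gpus get_optimal_gpus_alt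
  rw [pvLoopA_eq_take, pvLoopB_eq_take (pvGroupNodes data).items.length _ _ _ le_rfl]
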